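-- pv_equiv track=rewrite | github.com/antho77m/Azul | Azul_graph.py | detecte_co_souris_motif
-- ===== SOURCE A (Python) =====
-- def detecte_co_souris_motif(ax,ay,coordonne=(0,0)):
--     bx=ax+40
--     by=ay+40
--     a=ax    #memoire pour revenir a la ligne
--     b=bx    #memoire pour revenir a la ligne
--     position_souris=-1
--     for i in range(5):
--         ay=ay+40
--         by=by+40
--
--         for e in range(i+1):
--             if ax<coordonne[0] and bx>coordonne[0] and coordonne[1]>ay and coordonne[1]<by:
--                 position_souris= i
--
--             ax=ax-40
--             bx=bx-40
--         ax=a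
--         bx=b
--
--     return position_souris
-- ===== SOURCE B (Python) =====
-- def detecte_co_souris_motif(ax, ay, coordonne=(0, 0)):
--     # Row from the y-coordinate: band i is the open interval (ay+40*(i+1), ay+40*(i+2)).
--     t = coordonne[1] - ay - 40
--     if t <= 0 or t >= 200 or t % 40 == 0:
--         return -1
--     i = t // 40
--     # Box check: x must be strictly inside one of the row's boxes
--     # (ax-40*e, ax+40-40*e) for e in 0..i, i.e. strictly inside (ax-40*i, ax+40)
--     # and not on an inter-box boundary (a multiple of 40 away from ax).
--     s = coordonne[0] - ax
--     if -40 * i < s < 40 and s % 40 != 0: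
--         return i
--     return -1
-- ===== Notes on version B (the rewrite author's own statement) =====
-- stated objective: simpler
-- what changed: Replaced A's nested scan over 5 rows and their per-row shifted boxes (15 interval checks with mutable ax/bx/ay/by state) by direct arithmetic: the row index is computed from the y-offset by floor division, and the x-offset is checked against the row's band with one interval test plus a modulus test for the inter-box grid lines.
import Mathlib
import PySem

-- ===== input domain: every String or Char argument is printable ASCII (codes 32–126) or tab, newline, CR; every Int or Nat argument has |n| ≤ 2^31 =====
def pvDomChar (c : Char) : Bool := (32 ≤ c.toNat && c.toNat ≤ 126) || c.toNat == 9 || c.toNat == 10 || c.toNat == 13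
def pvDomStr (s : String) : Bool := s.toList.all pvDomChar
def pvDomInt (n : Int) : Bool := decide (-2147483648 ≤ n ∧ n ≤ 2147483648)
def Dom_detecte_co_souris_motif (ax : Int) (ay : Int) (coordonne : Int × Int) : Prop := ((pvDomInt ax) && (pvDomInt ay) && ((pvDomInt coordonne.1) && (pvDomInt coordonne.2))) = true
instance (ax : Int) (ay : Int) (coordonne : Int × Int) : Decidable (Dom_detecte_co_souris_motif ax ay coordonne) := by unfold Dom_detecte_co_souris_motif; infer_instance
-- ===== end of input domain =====

-- B replaces A's nested 5-row box scan by direct index arithmetic (row from the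
-- y-offset, one interval-plus-modulus test on the x-offset); objective: simpler.


-- ===== PORT A =====
-- Literal port of A: nested for-loops over range(5) / range(i+1), state (ax, bx, ay, by, pos).
def detecte_co_souris_motif (ax : Int) (ay : Int) (coordonne : Int × Int) : Int :=
  let bx := ax + 40
  let by_ := ay + 40
  let a := ax
  let b := bx
  let st :=
    (PySem.List.pyRange 0 5 1).foldl
      (fun (st : Int × Int × Int × Int × Int) i =>
        let (ax, bx, ay, by_, pos) := st
        let ay := ay + 40
        let by_ := by_ + 40
        let st2 :=
          (PySem.List.pyRange 0 (i + 1) 1).foldl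
            (fun (st2 : Int × Int × Int) _e =>
              let (ax, bx, pos) := st2
              let pos :=
                if ax < coordonne.1 ∧ bx > coordonne.1 ∧ coordonne.2 > ay ∧ coordonne.2 < by_ then i
                else pos
              (ax - 40, bx - 40, pos))
            (ax, bx, pos)
        let (_, _, pos) := st2
        (a, b, ay, by_, pos))
      (ax, bx, ay, by_, (-1 : Int))
  st.2.2.2.2

-- ===== PORT B =====
-- Literal port of B: closed-form row index from y, then a band test on x.
def detecte_co_souris_motif_alt (ax : Int) (ay : Int) (coordonne : Int × Int) : Int :=
  let t := coordonne.2 - ay - 40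
  if t ≤ 0 ∨ t ≥ 200 ∨ PySem.Int.mod t 40 = 0 then -1
  else
    let i := PySem.Int.floordiv t 40
    let s := coordonne.1 - ax
    if -40 * i < s ∧ s < 40 ∧ PySem.Int.mod s 40 ≠ 0 then i
    else -1

-- ===== PRECONDITION & SPEC =====
def Spec_detecte_co_souris_motif (ax : Int) (ay : Int) (coordonne : Int × Int) (out : Int) : Prop := out = detecte_co_souris_motif_alt ax ay coordonne
instance (ax : Int) (ay : Int) (coordonne : Int × Int) (out : Int) : Decidable (Spec_detecte_co_souris_motif ax ay coordonne out) := by unfold Spec_detecte_co_souris_motif; infer_instance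

-- ===== CLAIM (what is proved, stated in full; the proofs are below) =====
def Claim_equal_detecte_co_souris_motif : Prop := ∀ (ax : Int) (ay : Int) (coordonne : Int × Int), Dom_detecte_co_souris_motif ax ay coordonne → Spec_detecte_co_souris_motif ax ay coordonne (detecte_co_souris_motif ax ay coordonne)

-- ===== LEMMAS AND PROOFS =====

-- The canonical nested-ite chain A's two loops compute (constants folded, comparisons oriented).
def rowScan (ax ay x y : Int) : Int :=
  (if ax - 160 < x ∧ x < ax - 120 ∧ ay + 200 < y ∧ y < ay + 240 then 4 else (if ax - 120 < x ∧ x < ax - 80 ∧ ay + 200 < y ∧ y < ay + 240 then 4 else (if ax - 80 < x ∧ x < ax - 40 ∧ ay + 200 < y ∧ y < ay + 240 then 4 else (if ax - 40 < x ∧ x < ax ∧ ay + 200 < y ∧ y < ay + 240 then 4 else (if ax < x ∧ x < ax + 40 ∧ ay + 200 < y ∧ y < ay + 240 then 4 else (if ax - 120 < x ∧ x < ax - 80 ∧ ay + 160 < y ∧ y < ay + 200 then 3 else (if ax - 80 < x ∧ x < ax - 40 ∧ ay + 160 < y ∧ y < ay + 200 then 3 else (if ax - 40 < x ∧ x < ax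 ∧ ay + 160 < y ∧ y < ay + 200 then 3 else (if ax < x ∧ x < ax + 40 ∧ ay + 160 < y ∧ y < ay + 200 then 3 else (if ax - 80 < x ∧ x < ax - 40 ∧ ay + 120 < y ∧ y < ay + 160 then 2 else (if ax - 40 < x ∧ x < ax ∧ ay + 120 < y ∧ y < ay + 160 then 2 else (if ax < x ∧ x < ax + 40 ∧ ay + 120 < y ∧ y < ay + 160 then 2 else (if ax - 40 < x ∧ x < ax ∧ ay + 80 < y ∧ y < ay + 120 then 1 else (if ax < x ∧ x < ax + 40 ∧ ay + 80 < y ∧ y < ay + 120 then 1 else (if ax < x ∧ x < ax + 40 ∧ ay + 40 < y ∧ y < ay + 80 then 0 else (-1 : Int))))))))))))))))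

-- A's two literal loops fully unrolled: the exact nested-ite chain the foldl computes
-- (last assignment wins, so the outermost ite is the last (i, e) iteration).
set_option maxHeartbeats 2000000 in
lemma A_closed (ax ay x y : Int) :
    detecte_co_souris_motif ax ay (x, y) =
      (if ax - 40 - 40 - 40 - 40 < x ∧ ax + 40 - 40 - 40 - 40 - 40 > x ∧ y > ay + 40 + 40 + 40 + 40 + 40 ∧ y < ay + 40 + 40 + 40 + 40 + 40 + 40 then 4 else (if ax - 40 - 40 - 40 < x ∧ ax + 40 - 40 - 40 - 40 > x ∧ y > ay + 40 + 40 + 40 + 40 + 40 ∧ y < ay + 40 + 40 + 40 + 40 + 40 + 40 then 4 else (if ax - 40 - 40 < x ∧ ax + 40 - 40 - 40 > x ∧ y > ay + 40 + 40 + 40 + 40 + 40 ∧ y < ay + 40 + 40 + 40 + 40 + 40 + 40 then 4 else (if ax - 40 < x ∧ ax + 40 - 40 > x ∧ y > ay + 40 + 40 + 40 + 40 + 40 ∧ y < ay + 40 + 40 + 40 + 40 + 40 + 40 then 4 else (if ax < x ∧ ax + 40 > x ∧ y > ay + 40 + 40 + 40 + 40 + 40 ∧ y < ay + 40 + 40 +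 40 + 40 + 40 + 40 then 4 else (if ax - 40 - 40 - 40 < x ∧ ax + 40 - 40 - 40 - 40 > x ∧ y > ay + 40 + 40 + 40 + 40 ∧ y < ay + 40 + 40 + 40 + 40 + 40 then 3 else (if ax - 40 - 40 < x ∧ ax + 40 - 40 - 40 > x ∧ y > ay + 40 + 40 + 40 + 40 ∧ y < ay + 40 + 40 + 40 + 40 + 40 then 3 else (if ax - 40 < x ∧ ax + 40 - 40 > x ∧ y > ay + 40 + 40 + 40 + 40 ∧ y < ay + 40 + 40 + 40 + 40 + 40 then 3 else (if ax < x ∧ ax + 40 > x ∧ y > ay + 40 + 40 + 40 + 40 ∧ y < ay + 40 + 40 + 40 + 40 + 40 then 3 else (if ax - 40 - 40 < x ∧ ax + 40 - 40 - 40 > x ∧ y > ay + 40 + 40 + 40 ∧ y < ay + 40 + 40 + 40 + 40 then 2 else (if ax - 40 < x ∧ ax + 40 - 40 > x ∧ y > ay + 40 + 40 + 40 ∧ y < ay + 40 + 40 + 40 + 40 then 2 else (if ax < x ∧ ax + 40 > x ∧ y > ay + 40 + 40 + 40 ∧ y < ay + 40 + 40 + 40 + 40 then 2 else (if ax - 40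 < x ∧ ax + 40 - 40 > x ∧ y > ay + 40 + 40 ∧ y < ay + 40 + 40 + 40 then 1 else (if ax < x ∧ ax + 40 > x ∧ y > ay + 40 + 40 ∧ y < ay + 40 + 40 + 40 then 1 else (if ax < x ∧ ax + 40 > x ∧ y > ay + 40 ∧ y < ay + 40 + 40 then 0 else (-1 : Int)))))))))))))))):= by
  rfl

set_option maxHeartbeats 2000000 in
lemma A_closed2 (ax ay x y : Int) :
    detecte_co_souris_motif ax ay (x, y) = rowScan ax ay x y := by
  rw [A_closed]
  unfold rowScan
  norm_num [sub_sub, add_assoc]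

-- B's port with its lets zeta-reduced and PySem mod/floordiv replaced by % and / (divisor 40 > 0).
lemma B_closed2 (ax ay x y : Int) :
    detecte_co_souris_motif_alt ax ay (x, y) =
      (if y - ay - 40 ≤ 0 ∨ y - ay - 40 ≥ 200 ∨ (y - ay - 40) % 40 = 0 then -1
       else if -40 * ((y - ay - 40) / 40) < x - ax ∧ x - ax < 40 ∧ (x - ax) % 40 ≠ 0 then
         (y - ay - 40) / 40
       else -1) := by
  show (if y - ay - 40 ≤ 0 ∨ y - ay - 40 ≥ 200 ∨ PySem.Int.mod (y - ay - 40) 40 = 0 then -1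
       else if -40 * PySem.Int.floordiv (y - ay - 40) 40 < x - ax ∧ x - ax < 40 ∧
                PySem.Int.mod (x - ax) 40 ≠ 0 then PySem.Int.floordiv (y - ay - 40) 40
       else -1 : Int) = _
  rw [PySem.Int.mod_eq_emod_of_pos (a := y - ay - 40) (by norm_num),
    PySem.Int.mod_eq_emod_of_pos (a := x - ax) (by norm_num),
    PySem.Int.floordiv_eq_ediv_of_pos (a := y - ay - 40) (by norm_num)]

-- Outside every row band the chain returns -1.
lemma L_none (ax ay x y : Int)
    (h : y - ay - 40 ≤ 0 ∨ y - ay - 40 ≥ 200 ∨ (y - ay - 40) % 40 = 0) :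
    rowScan ax ay x y = -1 := by
  unfold rowScan
  rw [if_neg (show ¬(ax - 160 < x ∧ x < ax - 120 ∧ ay + 200 < y ∧ y < ay + 240) from by omega)]
  rw [if_neg (show ¬(ax - 120 < x ∧ x < ax - 80 ∧ ay + 200 < y ∧ y < ay + 240) from by omega)]
  rw [if_neg (show ¬(ax - 80 < x ∧ x < ax - 40 ∧ ay + 200 < y ∧ y < ay + 240) from by omega)]
  rw [if_neg (show ¬(ax - 40 < x ∧ x < ax ∧ ay + 200 < y ∧ y < ay + 240) from by omega)]
  rw [if_neg (show ¬(ax < x ∧ x < ax + 40 ∧ ay + 200 < y ∧ y < ay + 240) from by omega)]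
  rw [if_neg (show ¬(ax - 120 < x ∧ x < ax - 80 ∧ ay + 160 < y ∧ y < ay + 200) from by omega)]
  rw [if_neg (show ¬(ax - 80 < x ∧ x < ax - 40 ∧ ay + 160 < y ∧ y < ay + 200) from by omega)]
  rw [if_neg (show ¬(ax - 40 < x ∧ x < ax ∧ ay + 160 < y ∧ y < ay + 200) from by omega)]
  rw [if_neg (show ¬(ax < x ∧ x < ax + 40 ∧ ay + 160 < y ∧ y < ay + 200) from by omega)]
  rw [if_neg (show ¬(ax - 80 < x ∧ x < ax - 40 ∧ ay + 120 < y ∧ y < ay + 160) from by omega)]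
  rw [if_neg (show ¬(ax - 40 < x ∧ x < ax ∧ ay + 120 < y ∧ y < ay + 160) from by omega)]
  rw [if_neg (show ¬(ax < x ∧ x < ax + 40 ∧ ay + 120 < y ∧ y < ay + 160) from by omega)]
  rw [if_neg (show ¬(ax - 40 < x ∧ x < ax ∧ ay + 80 < y ∧ y < ay + 120) from by omega)]
  rw [if_neg (show ¬(ax < x ∧ x < ax + 40 ∧ ay + 80 < y ∧ y < ay + 120) from by omega)]
  rw [if_neg (show ¬(ax < x ∧ x < ax + 40 ∧ ay + 40 < y ∧ y < ay + 80) from by omega)]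

lemma L_row0 (ax ay x y : Int) (hlo : 0 < y - ay - 40) (hhi : y - ay - 40 < 40) :
    rowScan ax ay x y =
      (if -40 * 0 < x - ax ∧ x - ax < 40 ∧ (x - ax) % 40 ≠ 0 then 0 else -1) := by
  unfold rowScan
  rw [if_neg (show ¬(ax - 160 < x ∧ x < ax - 120 ∧ ay + 200 < y ∧ y < ay + 240) from by omega)]
  rw [if_neg (show ¬(ax - 120 < x ∧ x < ax - 80 ∧ ay + 200 < y ∧ y < ay + 240) from by omega)]
  rw [if_neg (show ¬(ax - 80 < x ∧ x < ax - 40 ∧ ay + 200 < y ∧ y < ay + 240) from by omega)]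
  rw [if_neg (show ¬(ax - 40 < x ∧ x < ax ∧ ay + 200 < y ∧ y < ay + 240) from by omega)]
  rw [if_neg (show ¬(ax < x ∧ x < ax + 40 ∧ ay + 200 < y ∧ y < ay + 240) from by omega)]
  rw [if_neg (show ¬(ax - 120 < x ∧ x < ax - 80 ∧ ay + 160 < y ∧ y < ay + 200) from by omega)]
  rw [if_neg (show ¬(ax - 80 < x ∧ x < ax - 40 ∧ ay + 160 < y ∧ y < ay + 200) from by omega)]
  rw [if_neg (show ¬(ax - 40 < x ∧ x < ax ∧ ay + 160 < y ∧ y < ay + 200) from by omega)]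
  rw [if_neg (show ¬(ax < x ∧ x < ax + 40 ∧ ay + 160 < y ∧ y < ay + 200) from by omega)]
  rw [if_neg (show ¬(ax - 80 < x ∧ x < ax - 40 ∧ ay + 120 < y ∧ y < ay + 160) from by omega)]
  rw [if_neg (show ¬(ax - 40 < x ∧ x < ax ∧ ay + 120 < y ∧ y < ay + 160) from by omega)]
  rw [if_neg (show ¬(ax < x ∧ x < ax + 40 ∧ ay + 120 < y ∧ y < ay + 160) from by omega)]
  rw [if_neg (show ¬(ax - 40 < x ∧ x < ax ∧ ay + 80 < y ∧ y < ay + 120) from by omega)]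
  rw [if_neg (show ¬(ax < x ∧ x < ax + 40 ∧ ay + 80 < y ∧ y < ay + 120) from by omega)]
  split_ifs <;> omega

lemma L_row1 (ax ay x y : Int) (hlo : 40 < y - ay - 40) (hhi : y - ay - 40 < 80) :
    rowScan ax ay x y =
      (if -40 * 1 < x - ax ∧ x - ax < 40 ∧ (x - ax) % 40 ≠ 0 then 1 else -1) := by
  unfold rowScan
  rw [if_neg (show ¬(ax - 160 < x ∧ x < ax - 120 ∧ ay + 200 < y ∧ y < ay + 240) from by omega)]
  rw [if_neg (show ¬(ax - 120 < x ∧ x < ax - 80 ∧ ay + 200 < y ∧ y < ay + 240) from by omega)]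
  rw [if_neg (show ¬(ax - 80 < x ∧ x < ax - 40 ∧ ay + 200 < y ∧ y < ay + 240) from by omega)]
  rw [if_neg (show ¬(ax - 40 < x ∧ x < ax ∧ ay + 200 < y ∧ y < ay + 240) from by omega)]
  rw [if_neg (show ¬(ax < x ∧ x < ax + 40 ∧ ay + 200 < y ∧ y < ay + 240) from by omega)]
  rw [if_neg (show ¬(ax - 120 < x ∧ x < ax - 80 ∧ ay + 160 < y ∧ y < ay + 200) from by omega)]
  rw [if_neg (show ¬(ax - 80 < x ∧ x < ax - 40 ∧ ay + 160 < y ∧ y < ay + 200) from by omega)]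
  rw [if_neg (show ¬(ax - 40 < x ∧ x < ax ∧ ay + 160 < y ∧ y < ay + 200) from by omega)]
  rw [if_neg (show ¬(ax < x ∧ x < ax + 40 ∧ ay + 160 < y ∧ y < ay + 200) from by omega)]
  rw [if_neg (show ¬(ax - 80 < x ∧ x < ax - 40 ∧ ay + 120 < y ∧ y < ay + 160) from by omega)]
  rw [if_neg (show ¬(ax - 40 < x ∧ x < ax ∧ ay + 120 < y ∧ y < ay + 160) from by omega)]
  rw [if_neg (show ¬(ax < x ∧ x < ax + 40 ∧ ay + 120 < y ∧ y < ay + 160) from by omega)]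
  rw [if_neg (show ¬(ax < x ∧ x < ax + 40 ∧ ay + 40 < y ∧ y < ay + 80) from by omega)]
  split_ifs <;> omega

lemma L_row2 (ax ay x y : Int) (hlo : 80 < y - ay - 40) (hhi : y - ay - 40 < 120) :
    rowScan ax ay x y =
      (if -40 * 2 < x - ax ∧ x - ax < 40 ∧ (x - ax) % 40 ≠ 0 then 2 else -1) := by
  unfold rowScan
  rw [if_neg (show ¬(ax - 160 < x ∧ x < ax - 120 ∧ ay + 200 < y ∧ y < ay + 240) from by omega)]
  rw [if_neg (show ¬(ax - 120 < x ∧ x < ax - 80 ∧ ay + 200 < y ∧ y < ay + 240) from by omega)]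
  rw [if_neg (show ¬(ax - 80 < x ∧ x < ax - 40 ∧ ay + 200 < y ∧ y < ay + 240) from by omega)]
  rw [if_neg (show ¬(ax - 40 < x ∧ x < ax ∧ ay + 200 < y ∧ y < ay + 240) from by omega)]
  rw [if_neg (show ¬(ax < x ∧ x < ax + 40 ∧ ay + 200 < y ∧ y < ay + 240) from by omega)]
  rw [if_neg (show ¬(ax - 120 < x ∧ x < ax - 80 ∧ ay + 160 < y ∧ y < ay + 200) from by omega)]
  rw [if_neg (show ¬(ax - 80 < x ∧ x < ax - 40 ∧ ay + 160 < y ∧ y < ay + 200) from by omega)]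
  rw [if_neg (show ¬(ax - 40 < x ∧ x < ax ∧ ay + 160 < y ∧ y < ay + 200) from by omega)]
  rw [if_neg (show ¬(ax < x ∧ x < ax + 40 ∧ ay + 160 < y ∧ y < ay + 200) from by omega)]
  rw [if_neg (show ¬(ax - 40 < x ∧ x < ax ∧ ay + 80 < y ∧ y < ay + 120) from by omega)]
  rw [if_neg (show ¬(ax < x ∧ x < ax + 40 ∧ ay + 80 < y ∧ y < ay + 120) from by omega)]
  rw [if_neg (show ¬(ax < x ∧ x < ax + 40 ∧ ay + 40 < y ∧ y < ay + 80) from by omega)]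
  split_ifs <;> omega

lemma L_row3 (ax ay x y : Int) (hlo : 120 < y - ay - 40) (hhi : y - ay - 40 < 160) :
    rowScan ax ay x y =
      (if -40 * 3 < x - ax ∧ x - ax < 40 ∧ (x - ax) % 40 ≠ 0 then 3 else -1) := by
  unfold rowScan
  rw [if_neg (show ¬(ax - 160 < x ∧ x < ax - 120 ∧ ay + 200 < y ∧ y < ay + 240) from by omega)]
  rw [if_neg (show ¬(ax - 120 < x ∧ x < ax - 80 ∧ ay + 200 < y ∧ y < ay + 240) from by omega)]
  rw [if_neg (show ¬(ax - 80 < x ∧ x < ax - 40 ∧ ay + 200 < y ∧ y < ay + 240) from by omega)]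
  rw [if_neg (show ¬(ax - 40 < x ∧ x < ax ∧ ay + 200 < y ∧ y < ay + 240) from by omega)]
  rw [if_neg (show ¬(ax < x ∧ x < ax + 40 ∧ ay + 200 < y ∧ y < ay + 240) from by omega)]
  rw [if_neg (show ¬(ax - 80 < x ∧ x < ax - 40 ∧ ay + 120 < y ∧ y < ay + 160) from by omega)]
  rw [if_neg (show ¬(ax - 40 < x ∧ x < ax ∧ ay + 120 < y ∧ y < ay + 160) from by omega)]
  rw [if_neg (show ¬(ax < x ∧ x < ax + 40 ∧ ay + 120 < y ∧ y < ay + 160) from by omega)]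
  rw [if_neg (show ¬(ax - 40 < x ∧ x < ax ∧ ay + 80 < y ∧ y < ay + 120) from by omega)]
  rw [if_neg (show ¬(ax < x ∧ x < ax + 40 ∧ ay + 80 < y ∧ y < ay + 120) from by omega)]
  rw [if_neg (show ¬(ax < x ∧ x < ax + 40 ∧ ay + 40 < y ∧ y < ay + 80) from by omega)]
  split_ifs <;> omega

lemma L_row4 (ax ay x y : Int) (hlo : 160 < y - ay - 40) (hhi : y - ay - 40 < 200) :
    rowScan ax ay x y =
      (if -40 * 4 < x - ax ∧ x - ax < 40 ∧ (x - ax) % 40 ≠ 0 then 4 else -1) := by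
  unfold rowScan
  rw [if_neg (show ¬(ax - 120 < x ∧ x < ax - 80 ∧ ay + 160 < y ∧ y < ay + 200) from by omega)]
  rw [if_neg (show ¬(ax - 80 < x ∧ x < ax - 40 ∧ ay + 160 < y ∧ y < ay + 200) from by omega)]
  rw [if_neg (show ¬(ax - 40 < x ∧ x < ax ∧ ay + 160 < y ∧ y < ay + 200) from by omega)]
  rw [if_neg (show ¬(ax < x ∧ x < ax + 40 ∧ ay + 160 < y ∧ y < ay + 200) from by omega)]
  rw [if_neg (show ¬(ax - 80 < x ∧ x < ax - 40 ∧ ay + 120 < y ∧ y < ay + 160) from by omega)]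
  rw [if_neg (show ¬(ax - 40 < x ∧ x < ax ∧ ay + 120 < y ∧ y < ay + 160) from by omega)]
  rw [if_neg (show ¬(ax < x ∧ x < ax + 40 ∧ ay + 120 < y ∧ y < ay + 160) from by omega)]
  rw [if_neg (show ¬(ax - 40 < x ∧ x < ax ∧ ay + 80 < y ∧ y < ay + 120) from by omega)]
  rw [if_neg (show ¬(ax < x ∧ x < ax + 40 ∧ ay + 80 < y ∧ y < ay + 120) from by omega)]
  rw [if_neg (show ¬(ax < x ∧ x < ax + 40 ∧ ay + 40 < y ∧ y < ay + 80) from by omega)]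
  split_ifs <;> omega

lemma main_eq (ax ay x y : Int) :
    detecte_co_souris_motif ax ay (x, y) = detecte_co_souris_motif_alt ax ay (x, y) := by
  rw [A_closed2, B_closed2]
  by_cases h1 : y - ay - 40 ≤ 0 ∨ y - ay - 40 ≥ 200 ∨ (y - ay - 40) % 40 = 0
  · rw [if_pos h1, L_none ax ay x y h1]
  · rw [if_neg h1]
    push Not at h1
    obtain ⟨ha, hb, hc⟩ := h1
    have hcases : (0 < y - ay - 40 ∧ y - ay - 40 < 40) ∨ (40 < y - ay - 40 ∧ y - ay - 40 < 80) ∨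
        (80 < y - ay - 40 ∧ y - ay - 40 < 120) ∨ (120 < y - ay - 40 ∧ y - ay - 40 < 160) ∨
        (160 < y - ay - 40 ∧ y - ay - 40 < 200) := by omega
    rcases hcases with ⟨h, h2⟩ | ⟨h, h2⟩ | ⟨h, h2⟩ | ⟨h, h2⟩ | ⟨h, h2⟩
    · rw [L_row0 ax ay x y h h2, show (y - ay - 40) / 40 = 0 from by omega]
    · rw [L_row1 ax ay x y h h2, show (y - ay - 40) / 40 = 1 from by omega]
    · rw [L_row2 ax ay x y h h2, show (y - ay - 40) / 40 = 2 from by omega]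
    · rw [L_row3 ax ay x y h h2, show (y - ay - 40) / 40 = 3 from by omega]
    · rw [L_row4 ax ay x y h h2, show (y - ay - 40) / 40 = 4 from by omega]

-- ===== VERDICT (by name: the statement is the Claim_ definition above) =====
theorem detecte_co_souris_motif_spec : Claim_equal_detecte_co_souris_motif := by
  intro ax ay c _
  obtain ⟨x, y⟩ := c
  unfold Spec_detecte_co_souris_motif
  exact main_eq ax ay x y
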